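-- pv_equiv track=rewrite | github.com/devill/aoc | 2023/day14.py | shift_line_left
-- ===== SOURCE A (Python) =====
-- def shift_line_left(line):
--     # Split the line at '#' as rocks will not pass these
--     segments = ''.join(line).split('#')
--     shifted_segments = []
--
--     for segment in segments:
--         # Count the number of 'O' and create a new segment with 'O's shifted to the left
--         count_o = segment.count('O')
--         new_segment = 'O' * count_o + '.' * (len(segment) - count_o)
--         shifted_segments.append(new_segment)
--
--     # Join the segments back together with '#'
--     return list('#'.join(shifted_segments))
-- ===== SOURCE B (Python) =====
-- def shift_line_left(line):
--     # Single streaming pass: count rocks and gaps since the last '#',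
--     # flushing them (rocks first) whenever a '#' is reached.
--     out = []
--     n_rocks = 0
--     n_gaps = 0
--     for c in ''.join(line):
--         if c == '#':
--             out.extend('O' * n_rocks)
--             out.extend('.' * n_gaps)
--             out.append('#')
--             n_rocks = 0
--             n_gaps = 0
--         elif c == 'O':
--             n_rocks += 1
--         else:
--             n_gaps += 1
--     out.extend('O' * n_rocks)
--     out.extend('.' * n_gaps)
--     return out
-- ===== Notes on version B (the rewrite author's own statement) =====
-- stated objective: alternative
-- what changed: Replaces the split-at-'#'/count/rebuild/join decomposition with a single streaming pass that keeps rock and gap counters since the last '#' and flushes them at each '#' and at the end.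
import Mathlib
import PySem

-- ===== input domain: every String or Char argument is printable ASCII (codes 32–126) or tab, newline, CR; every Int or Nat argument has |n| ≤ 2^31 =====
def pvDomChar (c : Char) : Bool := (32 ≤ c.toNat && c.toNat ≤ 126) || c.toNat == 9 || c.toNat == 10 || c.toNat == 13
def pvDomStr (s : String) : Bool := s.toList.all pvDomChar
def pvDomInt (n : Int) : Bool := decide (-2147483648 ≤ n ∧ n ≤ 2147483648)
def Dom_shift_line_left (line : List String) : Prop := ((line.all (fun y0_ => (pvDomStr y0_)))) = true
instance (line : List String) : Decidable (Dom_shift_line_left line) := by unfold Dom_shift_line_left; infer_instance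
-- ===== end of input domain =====

-- B replaces A's split-at-'#'/count/rebuild/join decomposition by a single streaming
-- pass with rock/gap counters flushed at each '#' (objective: alternative, same cost).

-- ===== PORT A =====
def shift_line_left (line : List String) : List String :=
  let segments := PySem.Chars.splitOn (PySem.Chars.join [] (line.map (·.toList))) ['#']
  let shifted_segments := segments.foldl (fun acc segment =>
      let count_o := PySem.List.count segment 'O'
      let new_segment := List.replicate count_o 'O' ++ List.replicate (segment.length - count_o) '.'
      acc ++ [new_segment]) []
  (PySem.Chars.join ['#'] shifted_segments).map (fun c => String.ofList [c])

-- ===== PORT B =====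
def shift_line_left_alt (line : List String) : List String :=
  let s := PySem.Chars.join [] (line.map (·.toList))
  let st := s.foldl (fun (st : List Char × Nat × Nat) c =>
      let (out, nR, nG) := st
      if c = '#' then (out ++ List.replicate nR 'O' ++ List.replicate nG '.' ++ ['#'], 0, 0)
      else if c = 'O' then (out, nR + 1, nG)
      else (out, nR, nG + 1)) ([], 0, 0)
  (st.1 ++ List.replicate st.2.1 'O' ++ List.replicate st.2.2 '.').map (fun c => String.ofList [c])

-- ===== PRECONDITION & SPEC =====
def Spec_shift_line_left (line : List String) (out : List String) : Prop := out = shift_line_left_alt line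
instance (line : List String) (out : List String) : Decidable (Spec_shift_line_left line out) := by unfold Spec_shift_line_left; infer_instance

-- ===== CLAIM (what is proved, stated in full; the proofs are below) =====
def Claim_equal_shift_line_left : Prop := ∀ (line : List String), Dom_shift_line_left line → Spec_shift_line_left line (shift_line_left line)

-- ===== LEMMAS AND PROOFS =====

/-- Simple recursive characterisation of splitting at '#'. -/
def splitH : List Char → List (List Char)
  | [] => [[]]
  | c :: r => if c = '#' then [] :: splitH r else (splitH r).modifyHead (c :: ·)

/-- A's per-segment rebuild. -/
def shiftSeg (seg : List Char) : List Char :=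
  List.replicate (List.count 'O' seg) 'O' ++ List.replicate (seg.length - List.count 'O' seg) '.'

/-- B's loop step, in the projection normal form `simp` produces from the port's lambda. -/
def stepB (st : List Char × Nat × Nat) (c : Char) : List Char × Nat × Nat :=
  if c = '#' then (st.1 ++ List.replicate st.2.1 'O' ++ List.replicate st.2.2 '.' ++ ['#'], 0, 0)
  else if c = 'O' then (st.1, st.2.1 + 1, st.2.2)
  else (st.1, st.2.1, st.2.2 + 1)

theorem splitH_ne_nil (l : List Char) : splitH l ≠ [] := by
  induction l with
  | nil => simp [splitH]
  | cons c r ih =>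
    simp only [splitH]
    split_ifs
    · simp
    · cases h : splitH r with
      | nil => exact absurd h ih
      | cons s t => simp

theorem splitOn_go_eq (l : List Char) : ∀ (fuel : Nat) (cur : List Char) (acc : List (List Char)),
    l.length ≤ fuel →
    PySem.Chars.splitOn.go ['#'] fuel l cur acc
      = acc.reverse ++ (splitH l).modifyHead (cur.reverse ++ ·) := by
  induction l with
  | nil =>
    intro fuel cur acc _
    cases fuel <;> simp [PySem.Chars.splitOn.go, splitH]
  | cons c r ih =>
    intro fuel cur acc hf
    cases fuel with
    | zero => simp at hf
    | succ f =>
      by_cases hc : c = '#'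
      · subst hc
        rw [show PySem.Chars.splitOn.go ['#'] (f+1) ('#' :: r) cur acc
              = PySem.Chars.splitOn.go ['#'] f r [] (cur.reverse :: acc) by
            simp [PySem.Chars.splitOn.go, List.isPrefixOf]]
        rw [ih f [] (cur.reverse :: acc) (by simpa using hf)]
        cases h : splitH r with
        | nil => exact absurd h (splitH_ne_nil r)
        | cons s t => simp [splitH, h]
      · rw [show PySem.Chars.splitOn.go ['#'] (f+1) (c :: r) cur acc
              = PySem.Chars.splitOn.go ['#'] f r (c :: cur) acc by
            simp [PySem.Chars.splitOn.go, List.isPrefixOf, Ne.symm hc]]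
        rw [ih f (c :: cur) acc (by simpa using hf)]
        cases h : splitH r with
        | nil => exact absurd h (splitH_ne_nil r)
        | cons s t => simp [splitH, h, hc]

theorem splitOn_eq_splitH (l : List Char) : PySem.Chars.splitOn l ['#'] = splitH l := by
  have h := splitOn_go_eq l (l.length + 1) [] [] (by omega)
  simp only [List.reverse_nil, List.nil_append] at h
  rw [show PySem.Chars.splitOn l ['#'] = PySem.Chars.splitOn.go ['#'] (l.length + 1) l [] [] from rfl, h]
  cases splitH l <;> simp

/-- B's pending counters merged into the first segment of the remaining input. -/
def shiftedFrom (cs : List Char) (nR nG : Nat) : List (List Char) :=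
  match splitH cs with
  | [] => []
  | s :: rest =>
      (List.replicate (nR + List.count 'O' s) 'O'
        ++ List.replicate (nG + (s.length - List.count 'O' s)) '.') :: rest.map shiftSeg

theorem shiftedFrom_zero (cs : List Char) : shiftedFrom cs 0 0 = (splitH cs).map shiftSeg := by
  cases h : splitH cs with
  | nil => simp [shiftedFrom, h]
  | cons s t => simp [shiftedFrom, h, shiftSeg]

theorem shiftedFrom_rock (r : List Char) (nR nG : Nat) :
    shiftedFrom ('O' :: r) nR nG = shiftedFrom r (nR + 1) nG := by
  cases h : splitH r with
  | nil => exact absurd h (splitH_ne_nil r)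
  | cons s t =>
    have hle : List.count 'O' s ≤ s.length := List.count_le_length
    have h1 : List.count 'O' ('O' :: s) = List.count 'O' s + 1 := List.count_cons_self
    simp only [shiftedFrom, splitH, if_neg (by decide : ¬ ('O' : Char) = '#'), h,
      List.modifyHead_cons, h1, List.length_cons]
    have h2 : nR + (List.count 'O' s + 1) = nR + 1 + List.count 'O' s := by omega
    have h3 : nG + (s.length + 1 - (List.count 'O' s + 1)) = nG + (s.length - List.count 'O' s) := by omega
    rw [h2, h3]

theorem shiftedFrom_other (c : Char) (hc : c ≠ '#') (ho : c ≠ 'O') (r : List Char) (nR nG : Nat) :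
    shiftedFrom (c :: r) nR nG = shiftedFrom r nR (nG + 1) := by
  cases h : splitH r with
  | nil => exact absurd h (splitH_ne_nil r)
  | cons s t =>
    have hle : List.count 'O' s ≤ s.length := List.count_le_length
    have h1 : List.count 'O' (c :: s) = List.count 'O' s := List.count_cons_of_ne ho
    simp only [shiftedFrom, splitH, if_neg hc, h, List.modifyHead_cons, h1, List.length_cons]
    have h2 : nG + (s.length + 1 - List.count 'O' s) = nG + 1 + (s.length - List.count 'O' s) := by omega
    rw [h2]

theorem run_eq (cs : List Char) : ∀ (out : List Char) (nR nG : Nat),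
    (cs.foldl stepB (out, nR, nG)).1
        ++ List.replicate (cs.foldl stepB (out, nR, nG)).2.1 'O'
        ++ List.replicate (cs.foldl stepB (out, nR, nG)).2.2 '.'
      = out ++ PySem.Chars.join ['#'] (shiftedFrom cs nR nG) := by
  induction cs with
  | nil =>
    intro out nR nG
    simp [shiftedFrom, splitH, PySem.Chars.join_singleton]
  | cons c r ih =>
    intro out nR nG
    by_cases hc : c = '#'
    · subst hc
      have hstep : stepB (out, nR, nG) '#'
          = (out ++ List.replicate nR 'O' ++ List.replicate nG '.' ++ ['#'], 0, 0) := by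
        simp [stepB]
      rw [List.foldl_cons, hstep, ih]
      cases h : splitH r with
      | nil => exact absurd h (splitH_ne_nil r)
      | cons s t =>
        rw [shiftedFrom_zero, h]
        rw [show shiftedFrom ('#' :: r) nR nG
            = (List.replicate nR 'O' ++ List.replicate nG '.') :: shiftSeg s :: List.map shiftSeg t by
          simp [shiftedFrom, splitH, h, shiftSeg]]
        rw [PySem.Chars.join_cons_cons]
        simp
    · by_cases ho : c = 'O'
      · subst ho
        have hstep : stepB (out, nR, nG) 'O' = (out, nR + 1, nG) := by
          simp [stepB, hc]
        rw [List.foldl_cons, hstep, ih, shiftedFrom_rock]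
      · have hstep : stepB (out, nR, nG) c = (out, nR, nG + 1) := by
          simp [stepB, hc, ho]
        rw [List.foldl_cons, hstep, ih, shiftedFrom_other c hc ho]

theorem stepB_eq :
    (fun (st : List Char × Nat × Nat) c =>
      let (out, nR, nG) := st
      if c = '#' then (out ++ List.replicate nR 'O' ++ List.replicate nG '.' ++ ['#'], 0, 0)
      else if c = 'O' then (out, nR + 1, nG)
      else (out, nR, nG + 1)) = stepB := by
  funext st c
  obtain ⟨o, a, b⟩ := st
  rfl

-- ===== VERDICT (by name: the statement is the Claim_ definition above) =====
theorem shift_line_left_spec : Claim_equal_shift_line_left := by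
  intro line _
  unfold Spec_shift_line_left shift_line_left shift_line_left_alt
  simp only [stepB_eq, splitOn_eq_splitH, PySem.List.count_eq,
    PySem.List.foldl_append_singleton_eq_map, List.nil_append]
  have := run_eq (PySem.Chars.join [] (line.map (·.toList))) [] 0 0
  rw [shiftedFrom_zero] at this
  rw [show ((splitH (PySem.Chars.join [] (line.map (·.toList)))).map
      (fun segment => List.replicate (List.count 'O' segment) 'O'
        ++ List.replicate (segment.length - List.count 'O' segment) '.'))
      = (splitH (PySem.Chars.join [] (line.map (·.toList)))).map shiftSeg from rfl]
  simp only [List.nil_append] at this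
  rw [← this]
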